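-- pv_equiv track=rewrite | github.com/oliviarmunoz/StackBot | src/main_ASS.py | compute_pyramid_layers
-- ===== SOURCE A (Python) =====
-- def compute_pyramid_layers(N: int):
--     k = 0
--     total = 0
--     while total + (k + 1) <= N:
--         k += 1
--         total += k
--     layers = list(range(k, 0, -1))
--     leftover = N - total
--     if leftover > 0:
--         layers[0] += leftover
--         layers = sorted(layers, reverse=True)
--     return layers
-- ===== SOURCE B (Python) =====
-- def compute_pyramid_layers(N: int):
--     # Exponential-then-binary search for the largest k whose triangular
--     # number fits in N (instead of A's layer-by-layer scan), then build the
--     # final list directly: the top layer already carries the leftover, no sort.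
--     if N < 1:
--         return []
--     hi = 2
--     while hi * (hi + 1) // 2 <= N:
--         hi *= 2
--     lo = 1  # invariant: tri(lo) <= N < tri(hi)
--     while hi - lo > 1:
--         mid = (lo + hi) // 2
--         if mid * (mid + 1) // 2 <= N:
--             lo = mid
--         else:
--             hi = mid
--     k = lo
--     return [k + N - k * (k + 1) // 2] + list(range(k - 1, 0, -1))
-- ===== Notes on version B (the rewrite author's own statement) =====
-- stated objective: alternative
-- what changed: Replaced A's linear scan that accumulates k and total one layer at a time (plus an in-place patch of the top layer followed by a re-sort) with an exponential-then-binary search for the largest k whose triangular number is at most N, building the result list directly with the leftover folded into the top layer and no sort.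
import Mathlib
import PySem

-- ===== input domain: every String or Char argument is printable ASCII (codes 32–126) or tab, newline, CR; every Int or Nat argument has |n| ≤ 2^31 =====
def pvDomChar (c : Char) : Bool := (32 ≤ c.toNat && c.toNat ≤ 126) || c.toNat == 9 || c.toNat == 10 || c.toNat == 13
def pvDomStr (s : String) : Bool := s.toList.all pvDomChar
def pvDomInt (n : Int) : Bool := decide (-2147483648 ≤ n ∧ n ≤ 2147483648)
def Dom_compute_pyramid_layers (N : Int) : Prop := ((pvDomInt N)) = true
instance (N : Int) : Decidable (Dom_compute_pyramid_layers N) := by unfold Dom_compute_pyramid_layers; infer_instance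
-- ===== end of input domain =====

-- B replaces A's linear scan for the largest k with tri(k) ≤ N by an exponential-then-binary
-- search and builds the list directly, leftover folded into the top layer, no sort.

-- termination lemmas cited by the ports' decreasing_by (hand-proved to keep the recursion closures small)
lemma pvLoopA_dec (N : Int) (k : Nat) (total : Int) (h : total + ((k : Int) + 1) ≤ N) :
    (N - (total + ((k : Int) + 1))).toNat < (N - total).toNat :=
  have hk : (0:Int) < (k:Int) + 1 := add_pos_of_nonneg_of_pos (Int.natCast_nonneg k) one_pos
  have hstep : total < total + ((k:Int) + 1) := lt_add_of_pos_right total hk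
  (Int.toNat_lt_toNat (sub_pos.mpr (lt_of_lt_of_le hstep h))).mpr (sub_lt_sub_left hstep N)

lemma pvGrow_dec (N hi : Int) (h1 : 1 ≤ hi) (hle : PySem.Int.floordiv (hi * (hi + 1)) 2 ≤ N) :
    (N + 1 - hi * 2).toNat < (N + 1 - hi).toNat :=
  have h0 : (0:Int) ≤ hi := le_trans zero_le_one h1
  have h2hi : 2 * hi ≤ hi * (hi + 1) := by
    calc 2 * hi = hi + hi := two_mul hi
      _ ≤ hi + hi * hi := add_le_add_right (le_mul_of_one_le_left h0 h1) hi
      _ = hi * (hi + 1) := by ring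
  have hdiv : hi ≤ hi * (hi + 1) / 2 :=
    (Int.le_ediv_iff_mul_le two_pos).mpr (le_of_eq_of_le (mul_comm hi 2) h2hi)
  have hiN : hi ≤ N :=
    le_trans hdiv (le_of_eq_of_le (PySem.Int.floordiv_eq_ediv_of_pos two_pos).symm hle)
  have hlt : hi < hi * 2 :=
    lt_of_lt_of_eq (lt_two_mul_self (lt_of_lt_of_le one_pos h1)) (mul_comm 2 hi)
  (Int.toNat_lt_toNat (sub_pos.mpr (lt_of_le_of_lt hiN (lt_add_one N)))).mpr
    (sub_lt_sub_left hlt (N + 1))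

lemma pvMid_gt (lo hi : Int) (h : hi - lo > 1) : lo < PySem.Int.floordiv (lo + hi) 2 :=
  lt_of_lt_of_le (lt_add_one lo)
    ((PySem.Int.le_floordiv_iff_mul_le two_pos).mpr (by linarith))

lemma pvMid_lt (lo hi : Int) (h : hi - lo > 1) : PySem.Int.floordiv (lo + hi) 2 < hi :=
  (PySem.Int.floordiv_lt_iff_lt_mul two_pos).mpr (by linarith)

lemma pvBin_dec_left (lo hi : Int) (h : hi - lo > 1) :
    (hi - PySem.Int.floordiv (lo + hi) 2).toNat < (hi - lo).toNat :=
  (Int.toNat_lt_toNat (sub_pos.mpr (by linarith))).mpr (sub_lt_sub_left (pvMid_gt lo hi h) hi)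

lemma pvBin_dec_right (lo hi : Int) (h : hi - lo > 1) :
    (PySem.Int.floordiv (lo + hi) 2 - lo).toNat < (hi - lo).toNat :=
  (Int.toNat_lt_toNat (sub_pos.mpr (by linarith))).mpr (sub_lt_sub_right (pvMid_lt lo hi h) lo)

-- ===== PORT A =====
-- the while loop: state (k, total), condition total + (k+1) <= N
def pvLoopA (N : Int) (k : Nat) (total : Int) : Nat × Int :=
  if _h : total + ((k : Int) + 1) ≤ N then pvLoopA N (k + 1) (total + ((k : Int) + 1))
  else (k, total)
termination_by (N - total).toNat
decreasing_by exact pvLoopA_dec N k total _h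

def compute_pyramid_layers (N : Int) : List Int :=
  let p := pvLoopA N 0 0
  let layers := PySem.List.pyRange (p.1 : Int) 0 (-1)
  let leftover := N - p.2
  if leftover > 0 then
    -- layers[0] += leftover; layers = sorted(layers, reverse=True)
    -- (Python would raise IndexError on layers = [], but leftover > 0 forces k ≥ 1, so [] is unreachable)
    match layers with
    | [] => []
    | x :: rest => PySem.List.sorted ((x + leftover) :: rest) (fun a => a) true
  else layers

-- ===== PORT B =====
-- doubling loop: while hi*(hi+1)//2 <= N: hi *= 2.
-- The '1 ≤ hi' conjunct is a totality guard only: hi starts at 2 and doubles, so it always holds.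
def pvGrow (N : Int) (hi : Int) : Int :=
  if hgd : 1 ≤ hi ∧ PySem.Int.floordiv (hi * (hi + 1)) 2 ≤ N then pvGrow N (hi * 2)
  else hi
termination_by (N + 1 - hi).toNat
decreasing_by exact pvGrow_dec N hi hgd.1 hgd.2

-- binary search: while hi - lo > 1, probe mid = (lo+hi)//2
def pvBin (N : Int) (lo hi : Int) : Int × Int :=
  if _h : hi - lo > 1 then
    let mid := PySem.Int.floordiv (lo + hi) 2
    if PySem.Int.floordiv (mid * (mid + 1)) 2 ≤ N then pvBin N mid hi
    else pvBin N lo mid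
  else (lo, hi)
termination_by (hi - lo).toNat
decreasing_by
  · exact pvBin_dec_left lo hi _h
  · exact pvBin_dec_right lo hi _h

def compute_pyramid_layers_alt (N : Int) : List Int :=
  if N < 1 then []
  else
    let hi := pvGrow N 2
    let p := pvBin N 1 hi
    let k := p.1
    (k + N - PySem.Int.floordiv (k * (k + 1)) 2) :: PySem.List.pyRange (k - 1) 0 (-1)

-- ===== PRECONDITION & SPEC =====
def Spec_compute_pyramid_layers (N : Int) (out : List Int) : Prop := out = compute_pyramid_layers_alt N
instance (N : Int) (out : List Int) : Decidable (Spec_compute_pyramid_layers N out) := by unfold Spec_compute_pyramid_layers; infer_instance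

-- ===== CLAIM (what is proved, stated in full; the proofs are below) =====
def Claim_equal_compute_pyramid_layers : Prop := ∀ (N : Int), Dom_compute_pyramid_layers N → Spec_compute_pyramid_layers N (compute_pyramid_layers N)

-- ===== LEMMAS AND PROOFS =====

-- triangular numbers
def pvTri : Nat → Int
  | 0 => 0
  | k + 1 => pvTri k + ((k : Int) + 1)

lemma pvTri_closed (k : Nat) : 2 * pvTri k = (k : Int) * ((k : Int) + 1) := by
  induction k with
  | zero => simp [pvTri]
  | succ m ih => simp only [pvTri]; push_cast; push_cast at ih; linarith

-- Ti x = x*(x+1)//2, the probe B computes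
def pvTi (x : Int) : Int := PySem.Int.floordiv (x * (x + 1)) 2

lemma pvTi_natCast (k : Nat) : pvTi (k : Int) = pvTri k := by
  unfold pvTi
  rw [PySem.Int.floordiv_eq_ediv_of_pos (by omega : (0:Int) < 2), ← pvTri_closed k]
  omega

lemma pvTi_strictMono {a b : Int} (ha : 0 ≤ a) (hab : a < b) : pvTi a < pvTi b := by
  unfold pvTi
  rw [PySem.Int.floordiv_eq_ediv_of_pos (by omega : (0:Int) < 2),
      PySem.Int.floordiv_eq_ediv_of_pos (by omega : (0:Int) < 2)]
  have h : a * (a + 1) + 2 ≤ b * (b + 1) := by nlinarith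
  omega

-- A's loop: the accumulator tracks the triangular numbers
lemma pvLoopA_tri (N : Int) (k : Nat) :
    (pvLoopA N k (pvTri k)).2 = pvTri (pvLoopA N k (pvTri k)).1 := by
  rw [pvLoopA]
  by_cases hc : pvTri k + ((k : Int) + 1) ≤ N
  · rw [dif_pos hc]
    have hstep : pvTri k + ((k : Int) + 1) = pvTri (k + 1) := by simp [pvTri]
    rw [hstep] at hc ⊢
    have := pvLoopA_tri N (k + 1)
    convert this using 3
  · rw [dif_neg hc]
termination_by (N - pvTri k).toNat
decreasing_by omega

lemma pvLoopA_fst_ge (N : Int) (k : Nat) (total : Int) : k ≤ (pvLoopA N k total).1 := by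
  unfold pvLoopA
  split
  · have := pvLoopA_fst_ge N (k + 1) (total + ((k : Int) + 1))
    omega
  · simp
termination_by (N - total).toNat
decreasing_by omega

lemma pvLoopA_stop (N : Int) (k : Nat) (total : Int) :
    ¬ ((pvLoopA N k total).2 + (((pvLoopA N k total).1 : Int) + 1) ≤ N) := by
  unfold pvLoopA
  split
  · exact pvLoopA_stop N (k + 1) (total + ((k : Int) + 1))
  · show ¬ (total + ((k : Int) + 1) ≤ N)
    omega
termination_by (N - total).toNat
decreasing_by omega

lemma pvLoopA_snd (N : Int) (k : Nat) (total : Int) :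
    (pvLoopA N k total).2 = total ∨ (pvLoopA N k total).2 ≤ N := by
  unfold pvLoopA
  split
  · rcases pvLoopA_snd N (k + 1) (total + ((k : Int) + 1)) with h | h
    · right; omega
    · right; exact h
  · left; rfl
termination_by (N - total).toNat
decreasing_by omega

-- characterisation of A's k for N ≥ 1: 1 ≤ K, total = tri(K), tri(K) ≤ N < tri(K+1)
lemma pvLoopA_char (N : Int) (hN : 1 ≤ N) :
    1 ≤ (pvLoopA N 0 0).1 ∧ (pvLoopA N 0 0).2 = pvTri (pvLoopA N 0 0).1 ∧
    pvTri (pvLoopA N 0 0).1 ≤ N ∧ N < pvTri ((pvLoopA N 0 0).1 + 1) := by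
  have htri : (pvLoopA N 0 0).2 = pvTri (pvLoopA N 0 0).1 := pvLoopA_tri N 0
  have hstop := pvLoopA_stop N 0 0
  have hstep : 1 ≤ (pvLoopA N 0 0).1 := by
    rw [pvLoopA, dif_pos (by push_cast; omega : (0 : Int) + (((0:Nat) : Int) + 1) ≤ N)]
    exact pvLoopA_fst_ge N 1 _
  have hle : (pvLoopA N 0 0).2 ≤ N := by
    rcases pvLoopA_snd N 0 0 with h | h
    · omega
    · exact h
  refine ⟨hstep, htri, by omega, ?_⟩
  have : pvTri ((pvLoopA N 0 0).1 + 1) = pvTri (pvLoopA N 0 0).1 + (((pvLoopA N 0 0).1 : Int) + 1) := by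
    simp [pvTri]
  omega

-- B's doubling loop (started at hi ≥ 1): returns hi' ≥ hi with tri(hi') > N
lemma pvGrow_spec (N : Int) (hi : Int) (h1 : 1 ≤ hi) :
    hi ≤ pvGrow N hi ∧ N < pvTi (pvGrow N hi) := by
  rw [pvGrow]
  by_cases hc : PySem.Int.floordiv (hi * (hi + 1)) 2 ≤ N
  · rw [dif_pos ⟨h1, hc⟩]
    have := pvGrow_spec N (hi * 2) (by omega)
    exact ⟨by omega, this.2⟩
  · rw [dif_neg (by tauto)]
    exact ⟨le_refl _, by unfold pvTi; omega⟩
termination_by (N + 1 - hi).toNat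
decreasing_by
  rw [PySem.Int.floordiv_eq_ediv_of_pos (by omega : (0:Int) < 2)] at hc
  have h3 : hi ≤ hi * (hi + 1) / 2 := by
    have : 2 * hi ≤ hi * (hi + 1) := by nlinarith
    omega
  omega

-- B's binary search: maintains tri(lo) ≤ N < tri(hi), ends bracketing N
lemma pvBin_spec (N : Int) (lo hi : Int) (hlo : 1 ≤ lo) (hord : lo < hi)
    (hL : pvTi lo ≤ N) (hH : N < pvTi hi) :
    1 ≤ (pvBin N lo hi).1 ∧ pvTi (pvBin N lo hi).1 ≤ N ∧ N < pvTi ((pvBin N lo hi).1 + 1) := by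
  rw [pvBin]
  by_cases hgap : hi - lo > 1
  · rw [dif_pos hgap]
    have hmlo : lo < PySem.Int.floordiv (lo + hi) 2 := by
      have : lo + 1 ≤ PySem.Int.floordiv (lo + hi) 2 := by
        rw [PySem.Int.le_floordiv_iff_mul_le (by omega : (0:Int) < 2)]; omega
      omega
    have hmhi : PySem.Int.floordiv (lo + hi) 2 < hi := by
      rw [PySem.Int.floordiv_lt_iff_lt_mul (by omega : (0:Int) < 2)]; omega
    by_cases hp : pvTi (PySem.Int.floordiv (lo + hi) 2) ≤ N
    · rw [if_pos (by exact hp)]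
      exact pvBin_spec N _ hi (by omega) (by omega) hp hH
    · rw [if_neg (by exact hp)]
      exact pvBin_spec N lo _ hlo (by omega) hL (by omega)
  · rw [dif_neg hgap]
    have hhi : hi = lo + 1 := by omega
    exact ⟨hlo, hL, by rw [← hhi]; exact hH⟩
termination_by (hi - lo).toNat
decreasing_by
  · have : lo < PySem.Int.floordiv (lo + hi) 2 := by
      have : lo + 1 ≤ PySem.Int.floordiv (lo + hi) 2 := by
        rw [PySem.Int.le_floordiv_iff_mul_le (by omega : (0:Int) < 2)]; omega
      omega
    omega
  · have : PySem.Int.floordiv (lo + hi) 2 < hi := by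
      rw [PySem.Int.floordiv_lt_iff_lt_mul (by omega : (0:Int) < 2)]; omega
    omega

-- uniqueness: both searches bracket the same triangular index
lemma pvK_unique (N a b : Int) (ha0 : 0 ≤ a) (hb0 : 0 ≤ b)
    (ha : pvTi a ≤ N ∧ N < pvTi (a + 1)) (hb : pvTi b ≤ N ∧ N < pvTi (b + 1)) : a = b := by
  by_contra hne
  rcases lt_or_gt_of_ne hne with h | h
  · rcases eq_or_lt_of_le (by omega : a + 1 ≤ b) with he | hlt
    · rw [he] at ha; omega
    · have := pvTi_strictMono (a := a + 1) (b := b) (by omega) hlt; omega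
  · rcases eq_or_lt_of_le (by omega : b + 1 ≤ a) with he | hlt
    · rw [he] at hb; omega
    · have := pvTi_strictMono (a := b + 1) (b := a) (by omega) hlt; omega

-- [m, m-1, …, 1] as pyRange, and its order facts
def pvDescTo : Nat → List Int
  | 0 => []
  | m + 1 => ((m : Int) + 1) :: pvDescTo m

lemma pyRange_desc (k : Nat) : PySem.List.pyRange (k : Int) 0 (-1) = pvDescTo k := by
  induction k with
  | zero => simp [PySem.List.pyRange_neg_one_eq_nil, pvDescTo]
  | succ m ih =>
    rw [PySem.List.pyRange_neg_one_cons (by push_cast; omega)]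
    simp only [pvDescTo]
    push_cast
    rw [show (m : Int) + 1 - 1 = (m : Int) by ring, ih]

lemma pvDescTo_le (m : Nat) : ∀ x ∈ pvDescTo m, x ≤ (m : Int) := by
  induction m with
  | zero => simp [pvDescTo]
  | succ m ih =>
    intro x hx
    simp only [pvDescTo, List.mem_cons] at hx
    rcases hx with h | h
    · omega
    · have := ih x h; push_cast; omega

lemma pvDescTo_pairwise (m : Nat) : (pvDescTo m).Pairwise (fun a b => b ≤ a) := by
  induction m with
  | zero => simp [pvDescTo]
  | succ m ih =>
    simp only [pvDescTo, List.pairwise_cons]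
    exact ⟨fun x hx => by have := pvDescTo_le m x hx; omega, ih⟩

-- ===== VERDICT (by name: the statement is the Claim_ definition above) =====
theorem compute_pyramid_layers_spec : Claim_equal_compute_pyramid_layers := by
  intro N _
  unfold Spec_compute_pyramid_layers compute_pyramid_layers compute_pyramid_layers_alt
  by_cases hN : N < 1
  · -- A's loop never runs: k = 0, total = 0, leftover ≤ 0
    rw [if_pos hN]
    have hA : pvLoopA N 0 0 = (0, 0) := by
      rw [pvLoopA, dif_neg (by push_cast; omega)]
    rw [hA]
    simp only
    rw [if_neg (by omega : ¬ N - 0 > 0)]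
    exact PySem.List.pyRange_neg_one_eq_nil (by omega)
  · rw [if_neg hN]
    obtain ⟨hk1, htot, hKle, hKlt⟩ := pvLoopA_char N (by omega)
    have hgrow := pvGrow_spec N 2 (by omega)
    have hbin := pvBin_spec N 1 (pvGrow N 2) (by omega) (by omega)
      (by rw [show pvTi 1 = 1 by decide]; omega) hgrow.2
    simp only
    set K := (pvLoopA N 0 0).1 with hK
    set L := (pvBin N 1 (pvGrow N 2)).1 with hL
    -- B's bracket equals A's K
    have hLK : L = (K : Int) := by
      apply pvK_unique N L (K : Int) (by omega) (by omega) ⟨hbin.2.1, hbin.2.2⟩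
      constructor
      · rw [pvTi_natCast]; omega
      · rw [show (K : Int) + 1 = ((K + 1 : Nat) : Int) by push_cast; ring, pvTi_natCast]; omega
    rw [hLK]
    obtain ⟨m, hm⟩ : ∃ m, K = m + 1 := ⟨K - 1, by omega⟩
    have htail : PySem.List.pyRange ((K : Int) - 1) 0 (-1) = pvDescTo m := by
      rw [hm, show (((m + 1 : Nat) : Int) - 1) = ((m : Nat) : Int) by push_cast; ring, pyRange_desc]
    have hhead : (K : Int) + N - PySem.Int.floordiv ((K : Int) * ((K : Int) + 1)) 2
        = ((m : Int) + 1) + (N - (pvLoopA N 0 0).2) := by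
      rw [show PySem.Int.floordiv ((K : Int) * ((K : Int) + 1)) 2 = pvTi (K : Int) from rfl,
        pvTi_natCast, ← htot, hm]
      push_cast; ring
    rw [pyRange_desc K, htail, hhead, hm]
    simp only [pvDescTo]
    by_cases hlo : N - (pvLoopA N 0 0).2 > 0
    · rw [if_pos hlo]
      have hpair : (((m : Int) + 1 + (N - (pvLoopA N 0 0).2)) :: pvDescTo m).Pairwise
          (fun a b => (fun x : Int => x) b ≤ (fun x : Int => x) a) := by
        rw [List.pairwise_cons]
        exact ⟨fun x hx => by
          have := pvDescTo_le m x hx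
          show x ≤ (m : Int) + 1 + (N - (pvLoopA N 0 0).2)
          omega, pvDescTo_pairwise m⟩
      exact PySem.List.sorted_rev_eq_self_of_pairwise _ _ hpair
    · rw [if_neg hlo]
      have hz : N - (pvLoopA N 0 0).2 = 0 := by
        rw [htot, hm] at hlo ⊢
        rw [hm] at hKle
        omega
      rw [hz]
      norm_num
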